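-- pv_equiv track=rewrite | github.com/ChrisHarig/apart-forecasting-tool | backend/app/services/forecast_benchmark.py | _validate_prediction_set_consistency
-- ===== SOURCE A (Python) =====
-- def _validate_prediction_set_consistency(rows: list[dict[str, object]]) -> list[dict[str, object]]:
--     keys = ("model_id", "model_name", "country_iso3", "source_id", "metric", "unit")
--     errors = []
--     first = rows[0]
--     for key in keys:
--         values = {row.get(key) for row in rows}
--         if len(values) > 1:
--             errors.append({"code": "mixed_prediction_set", "message": f"Prediction CSV contains multiple {key} values."})
--     return errors
-- ===== SOURCE B (Python) =====
-- def _validate_prediction_set_consistency(rows: list[dict[str, object]]) -> list[dict[str, object]]: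
--     keys = ("model_id", "model_name", "country_iso3", "source_id", "metric", "unit")
--     first = rows[0]
--     ref = {key: first.get(key) for key in keys}
--     mixed = set()
--     for row in rows:
--         for key in keys:
--             if row.get(key) != ref[key]:
--                 mixed.add(key)
--     return [
--         {"code": "mixed_prediction_set", "message": f"Prediction CSV contains multiple {key} values."}
--         for key in keys
--         if key in mixed
--     ]
-- ===== Notes on version B (the rewrite author's own statement) =====
-- stated objective: alternative
-- what changed: B replaces A's per-key set-comprehension over all rows (6 full scans building 6 hash sets) by one reference row plus a single pass over the rows that marks keys whose value differs from the first row's, then emits the errors in the fixed key order.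
import Mathlib
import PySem

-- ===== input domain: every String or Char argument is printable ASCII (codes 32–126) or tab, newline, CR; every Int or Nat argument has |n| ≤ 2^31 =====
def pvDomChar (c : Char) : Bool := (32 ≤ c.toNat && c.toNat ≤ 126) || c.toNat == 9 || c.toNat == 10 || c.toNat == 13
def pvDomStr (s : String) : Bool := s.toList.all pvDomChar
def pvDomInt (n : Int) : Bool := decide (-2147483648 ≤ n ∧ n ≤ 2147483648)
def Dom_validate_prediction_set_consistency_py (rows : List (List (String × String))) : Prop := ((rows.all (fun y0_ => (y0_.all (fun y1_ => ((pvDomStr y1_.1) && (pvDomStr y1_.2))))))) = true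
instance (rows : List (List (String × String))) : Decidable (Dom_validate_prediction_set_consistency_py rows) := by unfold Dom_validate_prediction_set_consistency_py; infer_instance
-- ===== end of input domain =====

-- B replaces A's six per-key value-set builds over all rows by a single pass marking keys that
-- differ from the first row; equal return value on every nonempty rows list (A and B both raise
-- IndexError on rows = []).


-- the fixed tuple of keys (shared literal of both programs)
def pvKeys : List String := ["model_id", "model_name", "country_iso3", "source_id", "metric", "unit"]

-- the error dict appended for a mixed key (same literal in both programs)
def pvErr (key : String) : List (String × String) :=
  [("code", "mixed_prediction_set"),
   ("message", "Prediction CSV contains multiple " ++ key ++ " values.")]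

-- row.get(key)  (dict.get: first match, none when absent)
def pvGet (row : List (String × String)) (key : String) : Option String :=
  (PySem.Dict.mk row).get? key

-- ===== PORT A =====
-- for key in keys: values = {row.get(key) for row in rows}; if len(values) > 1: errors.append(…)
-- (first = rows[0] is computed and unused; Pre_ carries the rows ≠ [] it demands)
def validate_prediction_set_consistency_py (rows : List (List (String × String))) : List (List (String × String)) :=
  pvKeys.foldl
    (fun errors key =>
      let values : PySem.Set (Option String) :=
        PySem.Set.ofList (rows.map (fun row => pvGet row key))
      if 1 < PySem.Set.len values then errors ++ [pvErr key] else errors)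
    []

-- ===== PORT B =====
-- first = rows[0]; ref = {key: first.get(key) for key in keys}; one pass over rows marking
-- differing keys into the set `mixed`; emit errors for the marked keys in keys order.
def validate_prediction_set_consistency_py_alt (rows : List (List (String × String))) : List (List (String × String)) :=
  match rows with
  | [] => []   -- unreachable under Pre_ (rows[0] raises IndexError in Python)
  | first :: _ =>
    let ref : PySem.Dict String (Option String) :=
      pvKeys.foldl (fun d key => d.insert key (pvGet first key)) PySem.Dict.empty
    let mixed : PySem.Set String :=
      rows.foldl
        (fun m row =>
          pvKeys.foldl
            (fun m key => if pvGet row key ≠ ref.getD key none then PySem.Set.add m key else m)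
            m)
        PySem.Set.empty
    -- ref[key] ported as ref.getD key none: exact, ref contains every key of pvKeys
    (pvKeys.filter (fun key => PySem.Set.contains mixed key)).map pvErr

-- ===== PRECONDITION & SPEC =====
-- Pre_ excludes exactly the empty rows list, on which A (rows[0]) raises IndexError.
def Pre_validate_prediction_set_consistency_py (rows : List (List (String × String))) : Prop := rows ≠ []
instance (rows : List (List (String × String))) : Decidable (Pre_validate_prediction_set_consistency_py rows) := by unfold Pre_validate_prediction_set_consistency_py; infer_instance
def pvWitness_validate_prediction_set_consistency_py : (List (List (String × String))) := [[("model_id", "m1"), ("metric", "gdp")]]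

def Spec_validate_prediction_set_consistency_py (rows : List (List (String × String))) (out : List (List (String × String))) : Prop := out = validate_prediction_set_consistency_py_alt rows
instance (rows : List (List (String × String))) (out : List (List (String × String))) : Decidable (Spec_validate_prediction_set_consistency_py rows out) := by unfold Spec_validate_prediction_set_consistency_py; infer_instance

-- ===== CLAIM (what is proved, stated in full; the proofs are below) =====
def Claim_equal_validate_prediction_set_consistency_py : Prop := ∀ (rows : List (List (String × String))), Dom_validate_prediction_set_consistency_py rows → Pre_validate_prediction_set_consistency_py rows → Spec_validate_prediction_set_consistency_py rows (validate_prediction_set_consistency_py rows)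

-- ===== LEMMAS AND PROOFS =====

-- A's test "len({row.get(key) for row in rows}) > 1" with rows = a-first list:
-- the set of values is bigger than a singleton iff some later value differs from the first.
lemma pv_set_big (a : Option String) (l : List (Option String)) :
    1 < PySem.Set.len (PySem.Set.ofList (a :: l)) ↔ ∃ x ∈ l, x ≠ a := by
  constructor
  · intro h
    by_contra hno
    push Not at hno
    have hsing : PySem.Set.ofList (a :: l) = [a] := by
      rw [PySem.Set.ofList_eq_foldl]
      have h0 : PySem.Set.add ([] : PySem.Set (Option String)) a = [a] := by simp [PySem.Set.add]
      simp only [List.foldl_cons, h0]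
      clear h0 h
      induction l with
      | nil => rfl
      | cons x t ih =>
        have hx : x = a := hno x (by simp)
        subst hx
        simp only [List.foldl_cons]
        have h1 : PySem.Set.add ([x] : PySem.Set (Option String)) x = [x] := by
          simp [PySem.Set.add]
        rw [h1]
        exact ih (fun y hy => hno y (by simp [hy]))
    rw [hsing] at h
    simp [PySem.Set.len] at h
  · rintro ⟨x, hx, hne⟩
    have hmx : x ∈ PySem.Set.ofList (a :: l) :=
      (PySem.Set.mem_ofList _ _).2 (List.mem_cons_of_mem _ hx)
    have hma : a ∈ PySem.Set.ofList (a :: l) :=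
      (PySem.Set.mem_ofList _ _).2 List.mem_cons_self
    have hcard : ({x, a} : Finset (Option String)).card ≤ (PySem.Set.ofList (a :: l)).toFinset.card := by
      apply Finset.card_le_card
      intro y hy
      rw [List.mem_toFinset]
      rcases Finset.mem_insert.mp hy with rfl | hy
      · exact hmx
      · rw [Finset.mem_singleton] at hy; subst hy; exact hma
    have h2 : ({x, a} : Finset (Option String)).card = 2 := Finset.card_pair hne
    have h3 := List.toFinset_card_le (PySem.Set.ofList (a :: l))
    simp only [PySem.Set.len]
    omega

-- membership in B's inner fold over the keys
lemma pv_mem_inner (p : String → Prop) [DecidablePred p] (keys : List String)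
    (m : PySem.Set String) (k : String) :
    k ∈ keys.foldl (fun m key => if p key then PySem.Set.add m key else m) m ↔
      k ∈ m ∨ (k ∈ keys ∧ p k) := by
  induction keys generalizing m with
  | nil => simp
  | cons y t ih =>
    simp only [List.foldl_cons, List.mem_cons]
    by_cases hy : p y
    · simp only [if_pos hy, ih, PySem.Set.mem_add]
      constructor
      · rintro ((h | rfl) | h) <;> tauto
      · rintro (h | ⟨(rfl | h), hp⟩) <;> tauto
    · simp only [if_neg hy, ih]
      constructor
      · rintro (h | h) <;> tauto
      · rintro (h | ⟨(rfl | h), hp⟩) <;> tauto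

-- membership in B's `mixed` after the pass over the rows
lemma pv_mem_mixed (P : List (String × String) → String → Prop) [∀ r k, Decidable (P r k)]
    (rows : List (List (String × String))) (m : PySem.Set String) (k : String) :
    k ∈ rows.foldl
        (fun m row => pvKeys.foldl (fun m key => if P row key then PySem.Set.add m key else m) m)
        m ↔
      k ∈ m ∨ ∃ row ∈ rows, k ∈ pvKeys ∧ P row k := by
  induction rows generalizing m with
  | nil => simp
  | cons r t ih =>
    simp only [List.foldl_cons, ih, pv_mem_inner, List.mem_cons]
    constructor
    · rintro ((h | ⟨hk, hp⟩) | ⟨row, hrow, hk, hp⟩)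
      · exact Or.inl h
      · exact Or.inr ⟨r, Or.inl rfl, hk, hp⟩
      · exact Or.inr ⟨row, Or.inr hrow, hk, hp⟩
    · rintro (h | ⟨row, (rfl | hrow), hk, hp⟩)
      · exact Or.inl (Or.inl h)
      · exact Or.inl (Or.inr ⟨hk, hp⟩)
      · exact Or.inr ⟨row, hrow, hk, hp⟩

-- ref = {key: first.get(key) for key in keys}: looking up any of the six keys gives first.get(key)
lemma pv_ref_getD (first : List (String × String)) (k : String) (hk : k ∈ pvKeys) :
    (pvKeys.foldl (fun d key => d.insert key (pvGet first key)) PySem.Dict.empty).getD k none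
      = pvGet first k := by
  fin_cases hk <;> rfl

-- ===== VERDICT (by name: the statement is the Claim_ definition above) =====
theorem validate_prediction_set_consistency_py_spec : Claim_equal_validate_prediction_set_consistency_py := by
  intro rows _ hpre
  unfold Spec_validate_prediction_set_consistency_py
  obtain ⟨first, rest, rfl⟩ : ∃ f r, rows = f :: r := by
    cases rows with
    | nil => exact absurd rfl hpre
    | cons f r => exact ⟨f, r, rfl⟩
  unfold validate_prediction_set_consistency_py validate_prediction_set_consistency_py_alt
  simp only []
  rw [show (fun (errors : List (List (String × String))) (key : String) =>
        if 1 < PySem.Set.len (PySem.Set.ofList ((first :: rest).map (fun row => pvGet row key)))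
        then errors ++ [pvErr key] else errors)
      = (fun errors key =>
        if (fun key => decide (1 < PySem.Set.len (PySem.Set.ofList ((first :: rest).map (fun row => pvGet row key))))) key = true
        then errors ++ [pvErr key] else errors) from by
      funext errors key; simp only [decide_eq_true_eq]]
  rw [PySem.List.foldl_append_if]
  simp only [List.nil_append]
  congr 1
  apply List.filter_congr
  intro k hk
  rw [Bool.eq_iff_iff]
  simp only [decide_eq_true_eq, PySem.Set.contains_iff]
  rw [pv_mem_mixed (P := fun row key =>
        pvGet row key ≠ (pvKeys.foldl (fun d key => d.insert key (pvGet first key)) PySem.Dict.empty).getD key none)]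
  simp only [List.map_cons, pv_set_big, pv_ref_getD first k hk]
  constructor
  · rintro ⟨x, hxm, hne⟩
    obtain ⟨row, hrow, rfl⟩ := List.mem_map.mp hxm
    exact Or.inr ⟨row, List.mem_cons_of_mem _ hrow, hk, hne⟩
  · rintro (h | ⟨row, hrow, -, hne⟩)
    · exact absurd h (by simp [PySem.Set.empty])
    · rcases List.mem_cons.mp hrow with rfl | hrow
      · exact absurd rfl hne
      · exact ⟨pvGet row k, List.mem_map.mpr ⟨row, hrow, rfl⟩, hne⟩
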